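-- pv_equiv track=rewrite | github.com/kunal0011/myWorksSpace | python/src/Amazon/131palindromepartioning.py | partitionDP
-- ===== SOURCE A (Python) =====
-- from typing import List, Dict, Set
--
-- def partitionDP(s: str) -> List[List[str]]:
--     """
--     Dynamic Programming approach.
--     Time: O(N * 2^N)
--     Space: O(N^2) for DP table
--     """
--     n = len(s)
--     # dp[i][j] indicates if s[i:j+1] is palindrome
--     dp = [[False] * n for _ in range(n)]
--
--     # All single characters are palindromes
--     for i in range(n):
--         dp[i][i] = True
--
--     # Fill DP table for palindrome substrings
--     for length in range(2, n + 1):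
--         for start in range(n - length + 1):
--             end = start + length - 1
--             if length == 2:
--                 dp[start][end] = s[start] == s[end]
--             else:
--                 dp[start][end] = s[start] == s[end] and dp[start + 1][end - 1]
--
--     def generate_partitions(start: int) -> List[List[str]]:
--         if start >= n:
--             return [[]]
--
--         partitions = []
--         for end in range(start, n):
--             if dp[start][end]:
--                 for partition in generate_partitions(end + 1):
--                     partitions.append([s[start:end + 1]] + partition)
--         return partitions
--
--     return generate_partitions(0)
-- ===== SOURCE B (Python) =====
-- from typing import List
--
-- def partitionDP(s: str) -> List[List[str]]:
--     # Bottom-up suffix table: results[i] = all palindrome partitions of s[i:],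
--     # each computed exactly once; palindromes checked directly by reversal
--     # (no DP table, no recursion).
--     n = len(s)
--     results = [[] for _ in range(n + 1)]
--     results[n] = [[]]
--     for start in range(n - 1, -1, -1):
--         acc = []
--         for end in range(start, n):
--             sub = s[start:end + 1]
--             if sub == ''.join(reversed(sub)):
--                 for p in results[end + 1]:
--                     acc.append([sub] + p)
--         results[start] = acc
--     return results[0]
-- ===== Notes on version B (the rewrite author's own statement) =====
-- stated objective: alternative
-- what changed: replaces the palindrome DP-table plus a recursive generator that re-enumerates each suffix many times with a single bottom-up pass filling a suffix table results[i] (each suffix's partition list computed once) and a direct reversal palindrome check, no recursion and no boolean table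
import Mathlib
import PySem

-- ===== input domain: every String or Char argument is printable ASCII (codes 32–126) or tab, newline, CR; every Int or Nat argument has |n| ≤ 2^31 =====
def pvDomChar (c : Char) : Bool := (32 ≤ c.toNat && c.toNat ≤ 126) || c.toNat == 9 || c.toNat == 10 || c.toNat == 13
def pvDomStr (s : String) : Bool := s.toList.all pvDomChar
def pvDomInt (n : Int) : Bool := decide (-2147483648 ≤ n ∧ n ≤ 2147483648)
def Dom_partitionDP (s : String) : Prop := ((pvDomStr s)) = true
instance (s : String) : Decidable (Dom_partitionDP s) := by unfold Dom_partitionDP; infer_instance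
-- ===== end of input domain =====

-- B replaces A's boolean-DP table + recursive generator (which re-enumerates each suffix
-- once per caller) by one bottom-up pass over a suffix table with a direct reversal
-- palindrome check; objective: alternative (same result, different algorithm).

-- ===== PORT A =====
-- dp[i][j] access/update on the list-of-lists table (indices always in range in A)
def pvGet2 (dp : List (List Bool)) (i j : Nat) : Bool := (dp.getD i []).getD j false

def pvSet2 (dp : List (List Bool)) (i j : Nat) (v : Bool) : List (List Bool) :=
  dp.set i ((dp.getD i []).set j v)

-- the body of A's inner `for start in range(n - length + 1)` loop
def pvFillStep (cs : List Char) (len : Nat) (dp : List (List Bool)) (start : Nat) :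
    List (List Bool) :=
  if len = 2 then
    pvSet2 dp start (start + len - 1) (cs.getD start 'a' == cs.getD (start + len - 1) 'a')
  else
    pvSet2 dp start (start + len - 1)
      ((cs.getD start 'a' == cs.getD (start + len - 1) 'a')
        && pvGet2 dp (start + 1) (start + len - 1 - 1))

-- `for i in range(n): dp[i][i] = True` applied to the all-False table
def pvDiag (cs : List Char) : List (List Bool) :=
  (List.range cs.length).foldl (fun dp i => pvSet2 dp i i true)
    (List.replicate cs.length (List.replicate cs.length false))

-- `for length in range(2, n + 1): for start in range(n - length + 1): …`
def pvDPfill (cs : List Char) : List (List Bool) :=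
  (List.range' 2 (cs.length - 1)).foldl
    (fun dp len => (List.range (cs.length - len + 1)).foldl (pvFillStep cs len) dp)
    (pvDiag cs)

-- A's recursive generate_partitions(start)
def pvGenParts (cs : List Char) (dp : List (List Bool)) (n start : Nat) :
    List (List String) :=
  if _h : n ≤ start then [[]]
  else
    (List.range' start (n - start)).attach.foldl
      (fun partitions ep =>
        if pvGet2 dp start ep.1 then
          partitions ++ (pvGenParts cs dp n (ep.1 + 1)).map
            (fun p => String.ofList (PySem.List.slice cs (some (start : Int)) (some ((ep.1 : Int) + 1))) :: p)
        else partitions)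
      []
termination_by n - start
decreasing_by
  have h2 := List.mem_range'_1.mp ep.2
  omega

def partitionDP (s : String) : List (List String) :=
  pvGenParts s.toList (pvDPfill s.toList) s.toList.length 0

-- ===== PORT B =====
-- the body of B's `for end in range(start, n)` loop (palindrome by reversal)
def pvBuildRow (cs : List Char) (n start : Nat) (results : List (List (List String))) :
    List (List String) :=
  (List.range' start (n - start)).foldl
    (fun acc (e : Nat) =>
      let sub := PySem.List.slice cs (some (start : Int)) (some ((e : Int) + 1))
      if sub == sub.reverse then
        acc ++ (results.getD (e + 1) []).map (fun p => String.ofList sub :: p)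
      else acc)
    []

def partitionDP_alt (s : String) : List (List String) :=
  let cs := s.toList
  let n := cs.length
  let results0 := (List.replicate (n + 1) ([] : List (List String))).set n [[]]
  let results := ((List.range n).reverse).foldl
    (fun results start => results.set start (pvBuildRow cs n start results)) results0
  results.getD 0 []

-- ===== PRECONDITION & SPEC =====
def Spec_partitionDP (s : String) (out : List (List String)) : Prop := out = partitionDP_alt s
instance (s : String) (out : List (List String)) : Decidable (Spec_partitionDP s out) := by
  unfold Spec_partitionDP; infer_instance

-- ===== CLAIM (what is proved, stated in full; the proofs are below) =====
def Claim_equal_partitionDP : Prop := ∀ (s : String), Dom_partitionDP s → Spec_partitionDP s (partitionDP s)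

-- ===== LEMMAS AND PROOFS =====

-- the substring s[i:j+1] as a list, and its palindrome test
def pvSeg (cs : List Char) (i j : Nat) : List Char := List.take (j + 1 - i) (List.drop i cs)

def pvPal (cs : List Char) (i j : Nat) : Bool := pvSeg cs i j == (pvSeg cs i j).reverse

-- the common mathematical recursion both ports compute
def gpSpec (cs : List Char) (n start : Nat) : List (List String) :=
  if _h : n ≤ start then [[]]
  else
    (List.range' start (n - start)).attach.foldl
      (fun acc ep =>
        if pvSeg cs start ep.1 == (pvSeg cs start ep.1).reverse then
          acc ++ (gpSpec cs n (ep.1 + 1)).map (fun p => String.ofList (pvSeg cs start ep.1) :: p)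
        else acc)
      []
termination_by n - start
decreasing_by
  have h2 := List.mem_range'_1.mp ep.2
  omega

lemma getD_set' {α : Type} (l : List α) (i j : Nat) (v d : α) :
    (l.set i v).getD j d = if j = i ∧ i < l.length then v else l.getD j d := by
  simp only [List.getD_eq_getElem?_getD, List.getElem?_set]
  split_ifs <;> simp_all <;> omega

def pvShape (n : Nat) (dp : List (List Bool)) : Prop :=
  dp.length = n ∧ ∀ i, i < n → (dp.getD i []).length = n

lemma shape_set2 (n : Nat) (dp : List (List Bool)) (i j : Nat) (v : Bool)
    (h : pvShape n dp) : pvShape n (pvSet2 dp i j v) := by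
  obtain ⟨h1, h2⟩ := h
  refine ⟨by simp [pvSet2, h1], ?_⟩
  intro i' hi'
  rw [pvSet2, getD_set']
  split_ifs with hc
  · simp only [List.length_set]
    exact h2 i (by omega)
  · exact h2 i' hi'

lemma get2_set2 (n : Nat) (dp : List (List Bool)) (i j : Nat) (v : Bool) (i' j' : Nat)
    (h : pvShape n dp) :
    pvGet2 (pvSet2 dp i j v) i' j'
      = if i' = i ∧ j' = j ∧ i < n ∧ j < n then v else pvGet2 dp i' j' := by
  obtain ⟨h1, h2⟩ := h
  unfold pvGet2 pvSet2
  rw [getD_set']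
  by_cases hi : i' = i ∧ i < dp.length
  · rw [if_pos hi]
    obtain ⟨hi1, hi2⟩ := hi
    subst hi1
    rw [getD_set']
    have hrow : (dp.getD i' []).length = n := h2 i' (by omega)
    rw [hrow]
    split_ifs with c1 c2 c2 <;> first | rfl | omega
  · rw [if_neg hi]
    rw [if_neg]
    rintro ⟨e1, _, e3, _⟩
    exact hi ⟨e1, by omega⟩

lemma diag_inv (cs : List Char) (k : Nat) (hk : k ≤ cs.length) :
    pvShape cs.length
      ((List.range k).foldl (fun dp i => pvSet2 dp i i true)
        (List.replicate cs.length (List.replicate cs.length false)))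
    ∧ ∀ i j, pvGet2
        ((List.range k).foldl (fun dp i => pvSet2 dp i i true)
          (List.replicate cs.length (List.replicate cs.length false))) i j
        = if i = j ∧ i < k then true else false := by
  induction k with
  | zero =>
    refine ⟨⟨by simp, ?_⟩, ?_⟩
    · intro i hi
      simp [List.getD_eq_getElem?_getD, hi]
    · intro i j
      simp only [List.range_zero, List.foldl_nil]
      unfold pvGet2
      simp only [List.getD_eq_getElem?_getD, List.getElem?_replicate]
      split_ifs <;> simp_all
  | succ k ih =>
    obtain ⟨sh, vals⟩ := ih (by omega)
    rw [List.range_succ, List.foldl_append, List.foldl_cons, List.foldl_nil]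
    refine ⟨shape_set2 _ _ _ _ _ sh, ?_⟩
    intro i j
    rw [get2_set2 cs.length _ k k true i j sh, vals i j]
    split_ifs <;> simp_all <;> omega

lemma pal_degenerate (cs : List Char) (i j : Nat) (h : j + 1 ≤ i) : pvPal cs i j = true := by
  unfold pvPal pvSeg
  rw [show j + 1 - i = 0 by omega]
  simp

lemma pal_singleton (cs : List Char) (i : Nat) (hi : i < cs.length) : pvPal cs i i = true := by
  have h : pvSeg cs i i = [cs[i]] := by
    unfold pvSeg
    rw [show i + 1 - i = 1 by omega, List.drop_eq_getElem_cons hi]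
    show List.take (0 + 1) _ = _
    rw [List.take_succ_cons, List.take_zero]
  unfold pvPal
  rw [h]
  simp

lemma seg_decomp (cs : List Char) (i j : Nat) (hij : i < j) (hj : j < cs.length) :
    pvSeg cs i j = cs.getD i 'a' :: (pvSeg cs (i + 1) (j - 1) ++ [cs.getD j 'a']) := by
  unfold pvSeg
  have hi : i < cs.length := by omega
  rw [List.drop_eq_getElem_cons hi]
  rw [show j + 1 - i = (j - i - 1 + 1) + 1 by omega, List.take_succ_cons]
  congr 1
  · exact (List.getD_eq_getElem cs 'a' hi).symm
  · rw [List.take_add_one]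
    have hlt : j - i - 1 < (cs.drop (i + 1)).length := by
      simp only [List.length_drop]; omega
    rw [show j - 1 + 1 - (i + 1) = j - i - 1 by omega]
    congr 1
    rw [List.getElem?_eq_getElem hlt]
    simp only [List.getElem_drop, Option.toList_some]
    congr 1
    rw [List.getD_eq_getElem cs 'a' hj]
    congr 1
    omega

lemma palrec_list (a b : Char) (m : List Char) :
    ((a :: (m ++ [b])) == (a :: (m ++ [b])).reverse) = ((a == b) && (m == m.reverse)) := by
  rw [Bool.eq_iff_iff]
  simp only [List.reverse_cons, List.reverse_append, List.reverse_nil, List.nil_append,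
    List.cons_append, Bool.and_eq_true, beq_iff_eq, List.cons.injEq]
  constructor
  · rintro ⟨hab, h2⟩
    subst hab
    refine ⟨rfl, ?_⟩
    have h3 := congrArg List.dropLast h2
    simpa using h3
  · rintro ⟨hab, h2⟩
    subst hab
    exact ⟨rfl, by rw [← h2]⟩

lemma pal_rec (cs : List Char) (i j : Nat) (hij : i < j) (hj : j < cs.length) :
    pvPal cs i j = ((cs.getD i 'a' == cs.getD j 'a') && pvPal cs (i + 1) (j - 1)) := by
  unfold pvPal
  rw [seg_decomp cs i j hij hj, palrec_list]

lemma fill_inner (cs : List Char) (L : Nat) (hL : 2 ≤ L) (hLn : L ≤ cs.length)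
    (dp : List (List Bool)) (hsh : pvShape cs.length dp)
    (hdp : ∀ i j, i ≤ j → j < cs.length →
      pvGet2 dp i j = if j + 1 - i ≤ L - 1 then pvPal cs i j else false)
    (k : Nat) (hk : k ≤ cs.length - L + 1) :
    pvShape cs.length ((List.range k).foldl (pvFillStep cs L) dp)
    ∧ ∀ i j, i ≤ j → j < cs.length →
        pvGet2 ((List.range k).foldl (pvFillStep cs L) dp) i j
          = if j + 1 - i ≤ L - 1 ∨ (j + 1 - i = L ∧ i < k) then pvPal cs i j else false := by
  induction k with
  | zero =>
    refine ⟨by simpa using hsh, ?_⟩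
    intro i j h1 h2
    simp only [List.range_zero, List.foldl_nil]
    rw [hdp i j h1 h2]
    exact if_congr (by omega) rfl rfl
  | succ k ih =>
    obtain ⟨sh, vals⟩ := ih (by omega)
    rw [List.range_succ, List.foldl_append, List.foldl_cons, List.foldl_nil]
    have hkn : k + L ≤ cs.length := by omega
    set D := (List.range k).foldl (pvFillStep cs L) dp with hD
    have hval : pvFillStep cs L D k = pvSet2 D k (k + L - 1) (pvPal cs k (k + L - 1)) := by
      by_cases hL2 : L = 2
      · subst hL2
        unfold pvFillStep
        rw [if_pos rfl]
        congr 1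
        rw [pal_rec cs k (k + 2 - 1) (by omega) (by omega),
            pal_degenerate cs (k + 1) (k + 2 - 1 - 1) (by omega)]
        simp
      · unfold pvFillStep
        rw [if_neg hL2]
        congr 1
        rw [vals (k + 1) (k + L - 1 - 1) (by omega) (by omega), if_pos (by left; omega),
            pal_rec cs k (k + L - 1) (by omega) (by omega)]
    rw [hval]
    refine ⟨shape_set2 _ _ _ _ _ sh, ?_⟩
    intro i j h1 h2
    rw [get2_set2 cs.length _ k (k + L - 1) _ i j sh, vals i j h1 h2]
    by_cases hc : i = k ∧ j = k + L - 1
    · obtain ⟨e1, e2⟩ := hc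
      subst e1
      subst e2
      rw [if_pos ⟨rfl, rfl, by omega, by omega⟩, if_pos (by right; omega)]
    · rw [if_neg (fun h => hc ⟨h.1, h.2.1⟩)]
      exact if_congr (by omega) rfl rfl

lemma fill_outer (cs : List Char) (m : Nat) (hm : m + 1 ≤ cs.length) :
    pvShape cs.length
      ((List.range' 2 m).foldl
        (fun dp len => (List.range (cs.length - len + 1)).foldl (pvFillStep cs len) dp)
        (pvDiag cs))
    ∧ ∀ i j, i ≤ j → j < cs.length →
        pvGet2 ((List.range' 2 m).foldl
          (fun dp len => (List.range (cs.length - len + 1)).foldl (pvFillStep cs len) dp)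
          (pvDiag cs)) i j
          = if j + 1 - i ≤ m + 1 then pvPal cs i j else false := by
  induction m with
  | zero =>
    obtain ⟨sh, vals⟩ := diag_inv cs cs.length (le_refl _)
    simp only [List.range'_zero, List.foldl_nil]
    unfold pvDiag
    refine ⟨sh, ?_⟩
    intro i j h1 h2
    rw [vals i j]
    by_cases hij : i = j
    · subst hij
      rw [if_pos ⟨rfl, h2⟩, if_pos (by omega), pal_singleton cs i h2]
    · rw [if_neg (fun h => hij h.1), if_neg (by omega)]
  | succ m ih =>
    obtain ⟨sh, vals⟩ := ih (by omega)
    rw [List.range'_concat, List.foldl_append, List.foldl_cons, List.foldl_nil]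
    simp only [one_mul]
    obtain ⟨sh', vals'⟩ := fill_inner cs (2 + m) (by omega) (by omega) _ sh
      (by
        intro i j h1 h2
        rw [vals i j h1 h2]
        exact if_congr (by omega) rfl rfl)
      (cs.length - (2 + m) + 1) (le_refl _)
    refine ⟨sh', ?_⟩
    intro i j h1 h2
    rw [vals' i j h1 h2]
    exact if_congr (by omega) rfl rfl

lemma dpfill_char (cs : List Char) (i j : Nat) (hij : i ≤ j) (hj : j < cs.length) :
    pvGet2 (pvDPfill cs) i j = pvPal cs i j := by
  have hn : 1 ≤ cs.length := by omega
  have h := (fill_outer cs (cs.length - 1) (by omega)).2 i j hij hj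
  unfold pvDPfill
  rw [h, if_pos (by omega)]

lemma gpA_eq (cs : List Char) : ∀ fuel start, cs.length - start ≤ fuel →
    pvGenParts cs (pvDPfill cs) cs.length start = gpSpec cs cs.length start := by
  intro fuel
  induction fuel with
  | zero =>
    intro start h
    have hs : cs.length ≤ start := by omega
    rw [pvGenParts, gpSpec, dif_pos hs, dif_pos hs]
  | succ fuel ih =>
    intro start h
    rw [pvGenParts, gpSpec]
    by_cases hs : cs.length ≤ start
    · rw [dif_pos hs, dif_pos hs]
    · rw [dif_neg hs, dif_neg hs]
      apply PySem.List.foldl_congr_mem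
      intro acc ep _
      have hep := List.mem_range'_1.mp ep.2
      have hrec := ih (ep.1 + 1) (by omega)
      have hslice : PySem.List.slice cs (some (start : Int)) (some ((ep.1 : Int) + 1))
          = pvSeg cs start ep.1 := by
        rw [show ((ep.1 : Int) + 1) = (((ep.1 + 1 : Nat)) : Int) by push_cast; ring]
        rw [PySem.List.slice_natCast]
        rfl
      have hcond : pvGet2 (pvDPfill cs) start ep.1
          = (pvSeg cs start ep.1 == (pvSeg cs start ep.1).reverse) :=
        dpfill_char cs start ep.1 (by omega) (by omega)
      rw [hslice, hcond, hrec]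

lemma buildRow_eq (cs : List Char) (start : Nat) (hs : start < cs.length)
    (results : List (List (List String)))
    (hres : ∀ i, start < i → i ≤ cs.length → results.getD i [] = gpSpec cs cs.length i) :
    pvBuildRow cs cs.length start results = gpSpec cs cs.length start := by
  rw [gpSpec, dif_neg (by omega)]
  unfold pvBuildRow
  rw [← List.foldl_attach]
  apply PySem.List.foldl_congr_mem
  intro acc ep _
  have hep := List.mem_range'_1.mp ep.2
  have hslice : PySem.List.slice cs (some (start : Int)) (some ((ep.1 : Int) + 1))
      = pvSeg cs start ep.1 := by
    rw [show ((ep.1 : Int) + 1) = (((ep.1 + 1 : Nat)) : Int) by push_cast; ring]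
    rw [PySem.List.slice_natCast]
    rfl
  simp only [hslice, hres (ep.1 + 1) (by omega) (by omega)]

lemma loopB (cs : List Char) : ∀ k, k ≤ cs.length → ∀ results : List (List (List String)),
    results.length = cs.length + 1 →
    (∀ i, k ≤ i → i ≤ cs.length → results.getD i [] = gpSpec cs cs.length i) →
    ∀ i, i ≤ cs.length →
    (((List.range k).reverse).foldl
      (fun r start => r.set start (pvBuildRow cs cs.length start r)) results).getD i []
      = gpSpec cs cs.length i := by
  intro k
  induction k with
  | zero =>
    intro _ results _ hres i hi
    simpa using hres i (Nat.zero_le i) hi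
  | succ k ih =>
    intro hk results hlen hres i hi
    rw [List.range_succ, List.reverse_append]
    simp only [List.reverse_cons, List.reverse_nil, List.nil_append]
    apply ih (by omega)
    · simp [hlen]
    · intro i' hi1 hi2
      rw [getD_set']
      by_cases hik : i' = k ∧ k < results.length
      · obtain ⟨e1, hlt⟩ := hik
        subst e1
        rw [if_pos ⟨rfl, hlt⟩]
        exact buildRow_eq cs i' (by omega) results (fun i h1 h2 => hres i (by omega) h2)
      · rw [if_neg hik]
        apply hres
        · have : ¬ i' = k := by
            intro e; exact hik ⟨e, by omega⟩
          omega
        · exact hi2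
    · exact hi

lemma alt_eq (s : String) : partitionDP_alt s = gpSpec s.toList s.toList.length 0 := by
  unfold partitionDP_alt
  apply loopB s.toList s.toList.length (le_refl _)
  · simp
  · intro i h1 h2
    have : i = s.toList.length := by omega
    subst this
    rw [getD_set', if_pos ⟨rfl, by simp⟩, gpSpec, dif_pos (le_refl _)]
  · exact Nat.zero_le _

lemma a_eq (s : String) : partitionDP s = gpSpec s.toList s.toList.length 0 := by
  unfold partitionDP
  exact gpA_eq s.toList s.toList.length 0 (le_refl _)

-- ===== VERDICT (by name: the statement is the Claim_ definition above) =====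
theorem partitionDP_spec : Claim_equal_partitionDP := by
  intro s _
  unfold Spec_partitionDP
  rw [a_eq, alt_eq]
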